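-- pv_equiv track=rewrite | github.com/Gopalakrishnan1996/python | Lib/practice1.py | panLipogramChecker
-- ===== SOURCE A (Python) =====
-- def panLipogramChecker(s):
--     s.lower()
--     alphabets = 'abcdefghijklmnopqrstuvwxyz'
--     # variable to keep count of all the letters
--     # not found in the string
--     counter = 0
--
--     # traverses the string for every
--     # letter of the alphabet
--     for ch in alphabets:
--         # character not found in string then increment count
--         if (s.find(ch) < 0):
--             counter += 1
--
--     if (counter == 0):
--         result = "Pangram"
--     elif (counter == 1):
--         result = "Pangrammatic Lipogram"
--     else:
--      result = "Not a pangram but might a lipogram"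
--
--     return result
-- ===== SOURCE B (Python) =====
-- def panLipogramChecker(s):
--     s.lower()
--     mask = 0
--     for ch in s:
--         o = ord(ch) - 97
--         if 0 <= o < 26:
--             mask |= 1 << o
--     missing = 26 - bin(mask).count('1')
--     if missing == 0:
--         return "Pangram"
--     if missing == 1:
--         return "Pangrammatic Lipogram"
--     return "Not a pangram but might a lipogram"
-- ===== Notes on version B (the rewrite author's own statement) =====
-- stated objective: alternative
-- what changed: Instead of scanning s once per alphabet letter (26 repeated s.find scans plus a missing-counter), B makes a single pass over s accumulating a 26-bit presence bitmask and derives the missing count from the mask's popcount.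
import Mathlib
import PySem

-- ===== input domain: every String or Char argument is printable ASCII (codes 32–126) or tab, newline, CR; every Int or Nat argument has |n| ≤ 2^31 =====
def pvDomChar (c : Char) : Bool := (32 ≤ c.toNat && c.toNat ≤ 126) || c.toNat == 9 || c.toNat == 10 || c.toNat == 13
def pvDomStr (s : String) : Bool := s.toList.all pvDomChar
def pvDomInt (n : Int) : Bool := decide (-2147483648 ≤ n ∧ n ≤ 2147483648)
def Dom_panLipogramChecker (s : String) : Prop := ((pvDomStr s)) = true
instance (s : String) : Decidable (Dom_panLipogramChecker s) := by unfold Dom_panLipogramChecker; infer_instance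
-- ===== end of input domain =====

-- B replaces A's per-letter scanning (26 repeated s.find passes with a missing-counter)
-- by a single pass over s that accumulates a 26-bit presence bitmask, deriving the
-- missing count from the mask's popcount (objective: alternative).


-- ===== PORT A =====
-- A computes s.lower() and discards the result, so it has no effect on the return value.
def panLipogramChecker (s : String) : String :=
  let alphabets : String := "abcdefghijklmnopqrstuvwxyz"
  let counter : Int :=
    alphabets.toList.foldl
      (fun counter ch =>
        if PySem.Chars.find s.toList [ch] < 0 then counter + 1 else counter) 0
  if counter = 0 then "Pangram"
  else if counter = 1 then "Pangrammatic Lipogram"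
  else "Not a pangram but might a lipogram"

-- ===== PORT B =====
-- one step of B's loop body: `o = ord(ch) - 97; if 0 <= o < 26: mask |= 1 << o`
def pvMaskStep (m : Nat) (c : Char) : Nat :=
  if 0 ≤ (c.toNat : Int) - 97 ∧ (c.toNat : Int) - 97 < 26
  then m ||| (1 <<< ((c.toNat : Int) - 97).toNat) else m

-- port of `bin(mask).count('1')`: the number of 1s in the binary representation
def pvPopcount : Nat → Nat
  | 0 => 0
  | n + 1 => pvPopcount ((n + 1) / 2) + (n + 1) % 2
decreasing_by exact Nat.div_lt_self (Nat.succ_pos n) (by omega)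

def panLipogramChecker_alt (s : String) : String :=
  let mask : Nat := s.toList.foldl pvMaskStep 0
  let missing : Int := 26 - (pvPopcount mask : Int)
  if missing = 0 then "Pangram"
  else if missing = 1 then "Pangrammatic Lipogram"
  else "Not a pangram but might a lipogram"

-- ===== PRECONDITION & SPEC =====
def Spec_panLipogramChecker (s : String) (out : String) : Prop := out = panLipogramChecker_alt s
instance (s : String) (out : String) : Decidable (Spec_panLipogramChecker s out) := by unfold Spec_panLipogramChecker; infer_instance

-- ===== CLAIM (what is proved, stated in full; the proofs are below) =====
def Claim_equal_panLipogramChecker : Prop := ∀ (s : String), Dom_panLipogramChecker s → Spec_panLipogramChecker s (panLipogramChecker s)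

-- ===== LEMMAS AND PROOFS =====

-- A single-character needle is an infix exactly when the character occurs in the haystack.
theorem singleton_infix_iff_mem (ch : Char) (s : List Char) : [ch] <:+: s ↔ ch ∈ s := by
  constructor
  · intro h; exact h.subset (List.mem_singleton_self ch)
  · intro h
    obtain ⟨l, r, rfl⟩ := List.append_of_mem h
    exact ⟨l, r, by simp⟩

-- A's per-letter test `s.find(ch) < 0` is exactly non-membership of ch in s.
theorem find_lt_zero_iff (ch : Char) (s : List Char) :
    PySem.Chars.find s [ch] < 0 ↔ ch ∉ s := by
  rw [← singleton_infix_iff_mem ch s, ← PySem.Chars.find_nonneg_iff]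
  omega

-- the recursion equation of pvPopcount, valid for every n
theorem pvPopcount_rec (n : Nat) : pvPopcount n = pvPopcount (n / 2) + n % 2 := by
  cases n with
  | zero => simp [pvPopcount]
  | succ n => conv_lhs => rw [pvPopcount]

-- pvPopcount counts the set bits below any bound 2^k
theorem pvPopcount_bits (k : Nat) : ∀ n, n < 2 ^ k →
    pvPopcount n = ∑ i ∈ Finset.range k, (n.testBit i).toNat := by
  induction k with
  | zero =>
      intro n hn
      interval_cases n
      simp [pvPopcount]
  | succ k ih =>
      intro n hn
      have h2 : n / 2 < 2 ^ k := by
        have := Nat.pow_succ 2 k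
        omega
      rw [pvPopcount_rec, ih _ h2, Finset.sum_range_succ']
      congr 1
      · exact Finset.sum_congr rfl (fun i _ => by rw [Nat.testBit_div_two])
      · rw [Nat.testBit_zero]
        rcases Nat.mod_two_eq_zero_or_one n with h | h <;> simp [h]

-- one step of B's fold, bitwise
theorem testBit_pvMaskStep (m : Nat) (c : Char) (i : Nat) :
    (pvMaskStep m c).testBit i =
      (m.testBit i || (decide (i < 26) && decide (c.toNat = 97 + i))) := by
  unfold pvMaskStep
  split_ifs with h
  · have ho : ((c.toNat : Int) - 97).toNat = c.toNat - 97 := by omega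
    rw [ho, Nat.one_shiftLeft, Nat.testBit_or, Nat.testBit_two_pow]
    have hc : 97 ≤ c.toNat ∧ c.toNat < 123 := by
      constructor <;> omega
    have : (c.toNat - 97 = i) ↔ (i < 26 ∧ c.toNat = 97 + i) := by omega
    simp [this]
  · have : ¬ (i < 26 ∧ c.toNat = 97 + i) := by
      intro ⟨h1, h2⟩
      apply h
      constructor <;> omega
    by_cases h1 : i < 26 <;> by_cases h2 : c.toNat = 97 + i <;>
      simp [h1, h2] at this ⊢

-- bits of B's final mask: bit i is set iff i < 26 and the letter chr(97+i) occurs in l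
theorem testBit_foldMask (l : List Char) : ∀ (m : Nat) (i : Nat),
    (l.foldl pvMaskStep m).testBit i =
      (m.testBit i || (decide (i < 26) && l.any (fun c => decide (c.toNat = 97 + i)))) := by
  induction l with
  | nil => intro m i; simp
  | cons c l ih =>
      intro m i
      simp only [List.foldl_cons, List.any_cons, ih, testBit_pvMaskStep]
      by_cases h1 : i < 26 <;>
        by_cases h2 : c.toNat = 97 + i <;>
          simp [h1, h2]

-- the mask stays below 2^26
theorem foldMask_lt (l : List Char) : l.foldl pvMaskStep 0 < 2 ^ 26 := by
  have hm : l.foldl pvMaskStep 0 &&& (2 ^ 26 - 1) = l.foldl pvMaskStep 0 := by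
    apply Nat.eq_of_testBit_eq
    intro i
    rw [Nat.testBit_and, Nat.testBit_two_pow_sub_one, testBit_foldMask]
    by_cases h : i < 26 <;> simp [h]
  rw [← hm]
  exact Nat.and_lt_two_pow _ (by norm_num)

-- membership of the i-th alphabet letter, expressed through codes
theorem mem_iff_any_code (s : List Char) (i : Nat) (hi : i < 26) :
    (Char.ofNat (97 + i) ∈ s) ↔ (s.any (fun c => decide (c.toNat = 97 + i)) = true) := by
  have hv : Nat.isValidChar (97 + i) := by left; omega
  have hto : (Char.ofNat (97 + i)).toNat = 97 + i := by
    rw [Char.toNat_ofNat, if_pos hv]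
  rw [List.any_eq_true]
  constructor
  · intro h; exact ⟨_, h, by simp [hto]⟩
  · rintro ⟨c, hc, hcode⟩
    have hcode' : c.toNat = 97 + i := of_decide_eq_true hcode
    have : c = Char.ofNat (97 + i) := Char.ext (by
      have : c.toNat = (Char.ofNat (97 + i)).toNat := by rw [hto]; exact hcode'
      exact UInt32.toNat_inj.mp this)
    rwa [← this]

-- countP over List.range as a Finset sum
theorem countP_range_eq_sum (p : Nat → Bool) : ∀ n,
    (List.range n).countP p = ∑ i ∈ Finset.range n, (p i).toNat := by
  intro n
  induction n with
  | zero => simp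
  | succ n ih =>
      rw [List.range_succ, List.countP_append, Finset.sum_range_succ, ih]
      cases h : p n <;> simp [h]

-- A's loop counter equals 26 minus the popcount of B's mask
theorem counter_eq_missing (s : List Char) :
    ("abcdefghijklmnopqrstuvwxyz".toList.foldl
      (fun counter ch =>
        if PySem.Chars.find s [ch] < 0 then counter + 1 else counter) (0 : Int)) =
    26 - (pvPopcount (s.foldl pvMaskStep 0) : Int) := by
  -- A's counter as a count of missing letters
  rw [show (fun (counter : Int) ch => if PySem.Chars.find s [ch] < 0 then counter + 1 else counter)
        = (fun (acc : Int) ch => if (fun ch => decide (PySem.Chars.find s [ch] < 0)) ch = true then acc + 1 else acc) from by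
      funext acc ch; simp]
  rw [PySem.List.foldl_count_if, zero_add]
  -- rewrite the alphabet as a range of codes
  rw [show "abcdefghijklmnopqrstuvwxyz".toList = (List.range 26).map (fun i => Char.ofNat (97 + i)) from by decide]
  rw [List.countP_map, countP_range_eq_sum]
  -- popcount of the mask as a sum of presence bits
  rw [pvPopcount_bits 26 _ (foldMask_lt s)]
  -- pair up the two sums: each index contributes 1 in total
  have key : ∀ i ∈ Finset.range 26,
      (((fun ch => decide (PySem.Chars.find s [ch] < 0)) ∘ (fun i => Char.ofNat (97 + i))) i).toNat
      + ((s.foldl pvMaskStep 0).testBit i).toNat = 1 := by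
    intro i hi
    have hi26 : i < 26 := Finset.mem_range.mp hi
    simp only [Function.comp]
    rw [testBit_foldMask]
    simp only [Nat.zero_testBit, Bool.false_or]
    by_cases h : Char.ofNat (97 + i) ∈ s
    · have := (mem_iff_any_code s i hi26).mp h
      simp [find_lt_zero_iff, h, this, hi26]
    · have : s.any (fun c => decide (c.toNat = 97 + i)) = false := by
        rw [Bool.eq_false_iff]
        intro hc
        exact h ((mem_iff_any_code s i hi26).mpr hc)
      simp [find_lt_zero_iff, h, this, hi26]
  have hsum : (∑ i ∈ Finset.range 26,
        (((fun ch => decide (PySem.Chars.find s [ch] < 0)) ∘ (fun i => Char.ofNat (97 + i))) i).toNat)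
      + (∑ i ∈ Finset.range 26, ((s.foldl pvMaskStep 0).testBit i).toNat) = 26 := by
    rw [← Finset.sum_add_distrib]
    rw [Finset.sum_congr rfl key]
    simp
  omega

-- ===== VERDICT (by name: the statement is the Claim_ definition above) =====
theorem panLipogramChecker_spec : Claim_equal_panLipogramChecker := by
  intro s _
  unfold Spec_panLipogramChecker panLipogramChecker panLipogramChecker_alt
  simp only [counter_eq_missing s.toList]
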